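-- pv_equiv track=rewrite | github.com/reini1305/adventofcode | 2020/6.py | split_answers
-- ===== SOURCE A (Python) =====
-- from typing import List
--
-- def split_answers(input: List[str])->List[List[str]] :
--     output = []
--     answer:List[str] = []
--     for line in input:
--         if line == '':
--             output.append(answer)
--             answer = []
--         else:
--             answer.append(line)
--     output.append(answer)
--     return output
-- ===== SOURCE B (Python) =====
-- from typing import List
--
-- def split_answers(input: List[str]) -> List[List[str]]:
--     positions = [i for i, line in enumerate(input) if line == '']
--     output = []
--     start = 0
--     for idx in positions:
--         output.append(input[start:idx])
--         start = idx + 1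
--     output.append(input[start:])
--     return output
-- ===== Notes on version B (the rewrite author's own statement) =====
-- stated objective: alternative
-- what changed: B first computes the list of blank-line indices, then builds every group by slicing between consecutive boundaries, instead of A's single pass that accumulates the current group line by line.
import Mathlib
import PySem

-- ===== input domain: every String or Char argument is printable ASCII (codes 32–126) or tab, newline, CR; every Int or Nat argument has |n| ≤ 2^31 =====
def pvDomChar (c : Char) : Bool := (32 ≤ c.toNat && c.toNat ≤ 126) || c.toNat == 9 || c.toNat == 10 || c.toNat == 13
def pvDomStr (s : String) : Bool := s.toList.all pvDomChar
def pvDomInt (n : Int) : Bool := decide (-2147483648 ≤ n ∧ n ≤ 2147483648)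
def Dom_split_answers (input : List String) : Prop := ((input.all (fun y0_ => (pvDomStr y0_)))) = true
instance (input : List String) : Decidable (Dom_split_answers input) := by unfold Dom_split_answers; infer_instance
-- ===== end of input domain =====

-- B splits by first collecting blank-line indices and slicing between boundaries, instead of A's per-line accumulation; same cost, different decomposition.

-- ===== PORT A =====
def split_answers (input : List String) : List (List String) :=
  let r := input.foldl
    (fun (st : List (List String) × List String) line =>
      if line == "" then (st.1 ++ [st.2], ([] : List String))
      else (st.1, st.2 ++ [line]))
    ([], [])
  r.1 ++ [r.2]

-- ===== PORT B =====
def split_answers_alt (input : List String) : List (List String) :=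
  let positions := ((PySem.List.enumerate input 0).filter (fun p => p.2 == "")).map (·.1)
  let r := positions.foldl
    (fun (st : List (List String) × Int) idx =>
      (st.1 ++ [PySem.List.slice input (some st.2) (some idx)], idx + 1))
    ([], 0)
  r.1 ++ [PySem.List.slice input (some r.2) none]

-- ===== PRECONDITION & SPEC =====
def Spec_split_answers (input : List String) (out : List (List String)) : Prop := out = split_answers_alt input
instance (input : List String) (out : List (List String)) : Decidable (Spec_split_answers input out) := by unfold Spec_split_answers; infer_instance

-- ===== CLAIM (what is proved, stated in full; the proofs are below) =====
def Claim_equal_split_answers : Prop := ∀ (input : List String), Dom_split_answers input → Spec_split_answers input (split_answers input)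

-- ===== LEMMAS AND PROOFS =====

/-- Reference splitter: groups of `xs` with the pending group `ans`. -/
def fA : List String → List String → List (List String)
  | ans, [] => [ans]
  | ans, x :: t => if x = "" then ans :: fA [] t else fA (ans ++ [x]) t

/-- Relative indices of the blank lines. -/
def blankIdx : List String → List Nat
  | [] => []
  | x :: t => if x = "" then 0 :: (blankIdx t).map (· + 1) else (blankIdx t).map (· + 1)

theorem foldlA_eq (xs : List String) : ∀ (out : List (List String)) (ans : List String),
    (let r := xs.foldl
      (fun (st : List (List String) × List String) line =>
        if line == "" then (st.1 ++ [st.2], ([] : List String))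
        else (st.1, st.2 ++ [line])) (out, ans)
     r.1 ++ [r.2]) = out ++ fA ans xs := by
  induction xs with
  | nil => intro out ans; simp [fA]
  | cons x t ih =>
    intro out ans
    simp only [beq_iff_eq] at ih ⊢
    by_cases hx : x = ""
    · simpa [List.foldl_cons, hx, fA] using ih (out ++ [ans]) []
    · simpa [List.foldl_cons, hx, fA] using ih out (ans ++ [x])

theorem enum_filter_eq (xs : List String) : ∀ (s : Int),
    (((PySem.List.enumerate xs s).filter (fun p => p.2 == "")).map (·.1))
      = (blankIdx xs).map (fun n : Nat => s + (n : Int)) := by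
  induction xs with
  | nil => intro s; simp [PySem.List.enumerate_nil, blankIdx]
  | cons x t ih =>
    intro s
    by_cases hx : x = ""
    · subst hx
      rw [PySem.List.enumerate_cons, List.filter_cons]
      simp only [beq_self_eq_true, if_true, List.map_cons, ih (s + 1), blankIdx,
        List.map_map, Function.comp_def]
      refine congrArg₂ _ (by ring) (List.map_congr_left fun n _ => by push_cast; ring)
    · rw [PySem.List.enumerate_cons, List.filter_cons]
      simp only [blankIdx, if_neg hx, beq_iff_eq, ih (s + 1), List.map_map,
        Function.comp_def]
      exact List.map_congr_left fun n _ => by push_cast; ring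

theorem core (input : List String) (xs : List String) :
    ∀ (acc : List String) (out : List (List String)) (start : Nat),
    input.drop start = acc ++ xs →
    (let r := ((blankIdx xs).map (fun n => ((start + acc.length + n : Nat) : Int))).foldl
        (fun (st : List (List String) × Int) idx =>
          (st.1 ++ [PySem.List.slice input (some st.2) (some idx)], idx + 1))
        (out, (start : Int))
     r.1 ++ [PySem.List.slice input (some r.2) none]) = out ++ fA acc xs := by
  induction xs with
  | nil =>
    intro acc out start h
    simp [blankIdx, fA, PySem.List.slice_from_natCast, h]
  | cons x t ih =>
    intro acc out start h
    by_cases hx : x = ""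
    · subst hx
      have hslice : PySem.List.slice input (some (start : Int)) (some ((start + acc.length : Nat) : Int))
          = acc := by
        rw [PySem.List.slice_natCast, h]
        simp
      have hdrop : input.drop (start + acc.length + 1) = t := by
        have h2 : input.drop (start + acc.length + 1)
            = (input.drop start).drop (acc.length + 1) := by
          rw [List.drop_drop]; ring_nf
        rw [h2, h]
        simp
      have ihx := ih [] (out ++ [acc]) (start + acc.length + 1) (by simpa using hdrop)
      simp only [blankIdx, reduceIte, List.map_cons, List.foldl_cons, List.map_map,
        List.length_nil, Nat.add_zero] at *
      rw [hslice]
      rw [show ((start + acc.length : Nat) : Int) + 1 = ((start + acc.length + 1 : Nat) : Int) by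
        push_cast; ring]
      rw [show ((fun n : Nat => ((start + acc.length + n : Nat) : Int)) ∘ fun x => x + 1)
            = (fun n : Nat => ((start + acc.length + 1 + n : Nat) : Int)) by
          funext n; simp only [Function.comp_apply]; omega]
      simpa [fA] using ihx
    · have hdrop : input.drop start = (acc ++ [x]) ++ t := by
        rw [h]; simp
      have ihx := ih (acc ++ [x]) out start hdrop
      simp only [blankIdx, if_neg hx, List.map_map]
      rw [show ((fun n : Nat => ((start + acc.length + n : Nat) : Int)) ∘ fun x => x + 1)
            = (fun n : Nat => ((start + (acc ++ [x]).length + n : Nat) : Int)) by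
          funext n; simp only [Function.comp_apply, List.length_append, List.length_cons,
            List.length_nil]; omega]
      simpa [fA, hx] using ihx

-- ===== VERDICT (by name: the statement is the Claim_ definition above) =====
theorem split_answers_spec : Claim_equal_split_answers := by
  intro input _
  unfold Spec_split_answers split_answers split_answers_alt
  rw [foldlA_eq input [] []]
  have he : (((PySem.List.enumerate input 0).filter (fun p => p.2 == "")).map (·.1))
      = (blankIdx input).map (fun n => ((0 + ([] : List String).length + n : Nat) : Int)) := by
    rw [enum_filter_eq input 0]
    exact List.map_congr_left fun n _ => by push_cast; simp
  rw [he]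
  have h := core input input [] [] 0 (by simp)
  simp only [Nat.cast_zero] at h
  simpa using h.symm
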